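-- pv_equiv track=rewrite | github.com/Dennis19075/challenge_ironAir | chalenge1.py | segmentacionCli
-- ===== SOURCE A (Python) =====
-- def segmentacionCli (customer_indices) :
--     segmentation = []
--     for cli in range (len(customer_indices)):
--         valueCli=customer_indices[cli]
--         if valueCli%3==0 and valueCli %5==0:
--             segmentation.append("Loyal-VIP")
--         elif valueCli%3==0:
--             segmentation.append("Loyal")
--         elif valueCli%5==0:
--             segmentation.append("VIP")
--         else:
--             segmentation.append("Regular")
--     return segmentation
-- ===== SOURCE B (Python) =====
-- def segmentacionCli(customer_indices):
--     # staged passes: start all "Regular", overwrite multiples of 3, then upgrade multiples of 5 in place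
--     seg = ["Regular"] * len(customer_indices)
--     for i, v in enumerate(customer_indices):
--         if v % 3 == 0:
--             seg[i] = "Loyal"
--     for i, v in enumerate(customer_indices):
--         if v % 5 == 0:
--             seg[i] = "Loyal-VIP" if seg[i] == "Loyal" else "VIP"
--     return seg
-- ===== Notes on version B (the rewrite author's own statement) =====
-- stated objective: alternative
-- what changed: Replaces the single pass with a four-way if/elif cascade by a staged overwrite algorithm: initialize every slot to "Regular", a first pass overwrites multiples of 3 with "Loyal", a second pass upgrades multiples of 5 in place (to "Loyal-VIP" if already "Loyal", else "VIP").
import Mathlib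
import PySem

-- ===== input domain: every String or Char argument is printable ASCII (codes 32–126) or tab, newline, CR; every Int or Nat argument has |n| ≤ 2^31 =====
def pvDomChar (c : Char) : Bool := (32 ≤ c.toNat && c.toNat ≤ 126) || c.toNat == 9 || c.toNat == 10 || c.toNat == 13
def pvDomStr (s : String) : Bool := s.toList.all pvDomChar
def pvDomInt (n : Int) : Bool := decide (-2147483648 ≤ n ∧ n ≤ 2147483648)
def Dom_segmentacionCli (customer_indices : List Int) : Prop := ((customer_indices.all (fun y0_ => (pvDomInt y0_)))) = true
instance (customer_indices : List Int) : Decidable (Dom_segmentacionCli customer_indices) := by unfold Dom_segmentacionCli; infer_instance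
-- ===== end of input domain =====

-- B replaces A's one-pass four-way branch cascade by a staged overwrite algorithm:
-- all slots start "Regular", a pass overwrites multiples of 3 with "Loyal",
-- a second pass upgrades multiples of 5 in place (alternative decomposition, same cost).

-- ===== PORT A =====
def segmentacionCli (customer_indices : List Int) : List String :=
  (PySem.List.pyRange 0 customer_indices.length 1).foldl
    (fun segmentation cli =>
      let valueCli := PySem.List.pyGetD customer_indices cli 0
      if PySem.Int.mod valueCli 3 = 0 ∧ PySem.Int.mod valueCli 5 = 0 then
        segmentation ++ ["Loyal-VIP"]
      else if PySem.Int.mod valueCli 3 = 0 then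
        segmentation ++ ["Loyal"]
      else if PySem.Int.mod valueCli 5 = 0 then
        segmentation ++ ["VIP"]
      else
        segmentation ++ ["Regular"]) []

-- ===== PORT B =====
-- seg[i] = x with i the nonneg enumerate index is List.set i.toNat (exact: 0 ≤ i < len seg);
-- the read seg[i] in pass 2 is PySem.List.pyGetD.
def segmentacionCli_alt (customer_indices : List Int) : List String :=
  (PySem.List.enumerate customer_indices 0).foldl
    (fun s iv =>
      if PySem.Int.mod iv.2 5 = 0 then
        s.set iv.1.toNat
          (if PySem.List.pyGetD s iv.1 "" = "Loyal" then "Loyal-VIP" else "VIP")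
      else s)
    ((PySem.List.enumerate customer_indices 0).foldl
      (fun s iv =>
        if PySem.Int.mod iv.2 3 = 0 then s.set iv.1.toNat "Loyal" else s)
      (List.replicate customer_indices.length "Regular"))

-- ===== PRECONDITION & SPEC =====
def Spec_segmentacionCli (customer_indices : List Int) (out : List String) : Prop := out = segmentacionCli_alt customer_indices
instance (customer_indices : List Int) (out : List String) : Decidable (Spec_segmentacionCli customer_indices out) := by unfold Spec_segmentacionCli; infer_instance

-- ===== CLAIM (what is proved, stated in full; the proofs are below) =====
def Claim_equal_segmentacionCli : Prop := ∀ (customer_indices : List Int), Dom_segmentacionCli customer_indices → Spec_segmentacionCli customer_indices (segmentacionCli customer_indices)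

-- ===== LEMMAS AND PROOFS =====

-- One in-place pass over enumerate: folding `set` at the running index over pre ++ post
-- rewrites exactly the post part, pairing each old slot with its element.
theorem pass_lemma (cond : Int → Prop) [DecidablePred cond] (g : String → Int → String) :
    ∀ (xs : List Int) (pre post : List String), post.length = xs.length →
    (PySem.List.enumerate xs (pre.length : Int)).foldl
      (fun s iv =>
        if cond iv.2 then s.set iv.1.toNat (g (PySem.List.pyGetD s iv.1 "") iv.2) else s)
      (pre ++ post)
    = pre ++ List.zipWith (fun old v => if cond v then g old v else old) post xs := by
  intro xs
  induction xs with
  | nil =>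
    intro pre post h
    simp at h
    simp [PySem.List.enumerate, h]
  | cons v xs ih =>
    intro pre post h
    cases post with
    | nil => simp at h
    | cons old post =>
      simp only [PySem.List.enumerate_cons, List.foldl_cons]
      have hget : PySem.List.pyGetD (pre ++ old :: post) (pre.length : Int) "" = old := by
        rw [show ((pre.length : Int)) = ((pre.length : Nat) : Int) from rfl,
          PySem.List.pyGetD_natCast]
        simp
      have hstep :
          (if cond v then
            (pre ++ old :: post).set ((pre.length : Int)).toNat
              (g (PySem.List.pyGetD (pre ++ old :: post) (pre.length : Int) "") v)
          else (pre ++ old :: post))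
          = (pre ++ [if cond v then g old v else old]) ++ post := by
        by_cases hc : cond v
        · simp [hc, hget]
        · simp [hc]
      rw [hstep]
      have hlen : ((pre.length : Int) + 1) = ((pre ++ [if cond v then g old v else old]).length : Int) := by
        simp
      rw [hlen, ih _ post (by simpa using h)]
      simp

theorem pass0 (cond : Int → Prop) [DecidablePred cond] (g : String → Int → String)
    (xs : List Int) (post : List String) (h : post.length = xs.length) :
    (PySem.List.enumerate xs 0).foldl
      (fun s iv =>
        if cond iv.2 then s.set iv.1.toNat (g (PySem.List.pyGetD s iv.1 "") iv.2) else s)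
      post
    = List.zipWith (fun old v => if cond v then g old v else old) post xs := by
  simpa using pass_lemma cond g xs [] post h

theorem zipWith_replicate_left (f : String → Int → String) (c : String) (xs : List Int) :
    List.zipWith f (List.replicate xs.length c) xs = xs.map (f c) := by
  induction xs with
  | nil => rfl
  | cons v xs ih => simp [List.replicate_succ, ih]

theorem zipWith_map_self (f : String → Int → String) (g : Int → String) (xs : List Int) :
    List.zipWith f (xs.map g) xs = xs.map (fun v => f (g v) v) := by
  induction xs with
  | nil => rfl
  | cons v xs ih => simp [ih]

-- B computes the per-element label as a map
theorem alt_eq_map (xs : List Int) :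
    segmentacionCli_alt xs
    = xs.map (fun v =>
        if PySem.Int.mod v 3 = 0 ∧ PySem.Int.mod v 5 = 0 then "Loyal-VIP"
        else if PySem.Int.mod v 3 = 0 then "Loyal"
        else if PySem.Int.mod v 5 = 0 then "VIP" else "Regular") := by
  unfold segmentacionCli_alt
  rw [pass0 (fun v => PySem.Int.mod v 3 = 0) (fun _ _ => "Loyal") xs _ (by simp),
      pass0 (fun v => PySem.Int.mod v 5 = 0)
        (fun old _ => if old = "Loyal" then "Loyal-VIP" else "VIP") xs _ (by simp)]
  rw [zipWith_replicate_left, zipWith_map_self]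
  apply List.map_congr_left
  intro v _
  simp only [PySem.Int.mod_eq_zero_iff_dvd]
  by_cases h3 : (3:Int) ∣ v <;> by_cases h5 : (5:Int) ∣ v <;> simp [h3, h5]

-- A computes the same map (range-index loop unfolded back-to-front)
theorem a_eq_map (xs : List Int) :
    segmentacionCli xs
    = xs.map (fun v =>
        if PySem.Int.mod v 3 = 0 ∧ PySem.Int.mod v 5 = 0 then "Loyal-VIP"
        else if PySem.Int.mod v 3 = 0 then "Loyal"
        else if PySem.Int.mod v 5 = 0 then "VIP" else "Regular") := by
  unfold segmentacionCli
  rw [PySem.List.foldl_pyRange_zero_pyGetD' xs 0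
    (fun segmentation valueCli =>
      if PySem.Int.mod valueCli 3 = 0 ∧ PySem.Int.mod valueCli 5 = 0 then
        segmentation ++ ["Loyal-VIP"]
      else if PySem.Int.mod valueCli 3 = 0 then
        segmentation ++ ["Loyal"]
      else if PySem.Int.mod valueCli 5 = 0 then
        segmentation ++ ["VIP"]
      else
        segmentation ++ ["Regular"]) []]
  induction xs using List.reverseRecOn with
  | nil => rfl
  | append_singleton ys y ih =>
    simp only [List.foldl_append, List.foldl_cons, List.foldl_nil, List.map_append, List.map_cons,
      List.map_nil, ih]
    split_ifs <;> simp_all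

-- ===== VERDICT (by name: the statement is the Claim_ definition above) =====
theorem segmentacionCli_spec : Claim_equal_segmentacionCli := by
  intro xs _
  unfold Spec_segmentacionCli
  rw [a_eq_map, alt_eq_map]
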